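-- pv_equiv track=rewrite | github.com/probhakarroy/Algorithms-Data-Structures | Algorithmic Toolbox/week3/grouping_children.py | min_group_sorted
-- ===== SOURCE A (Python) =====
-- def min_group_sorted(x):
--     R, i = [], 0
--     while i < len(x):
--         l, r = [x[i], x[i] + 1]
--         R.append([l, r])
--
--         while i < len(x) and x[i] <= r:
--             i += 1
--
--     return R
-- ===== SOURCE B (Python) =====
-- def min_group_sorted(x):
--     # stage 1: boundary scan -- bounds[k] is the current group's right boundary
--     # after the first k+1 points have been processed
--     bounds = []
--     for p in x:
--         if bounds and p <= bounds[-1]: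
--             bounds.append(bounds[-1])
--         else:
--             bounds.append(p + 1)
--     # stage 2: a group starts exactly where the boundary changes; the interval
--     # is reconstructed from the boundary alone as [b - 1, b]
--     return [[b - 1, b] for b, prev in zip(bounds, [None] + bounds[:-1]) if b != prev]
-- ===== Notes on version B (the rewrite author's own statement) =====
-- stated objective: alternative
-- what changed: Replaces A's nested whiles over a shared index (outer appends an interval, inner re-checks the length and indexes x[i] to skip covered points) by two staged passes: stage 1 computes a boundary scan array (the running right boundary after each point), stage 2 rebuilds the intervals purely from the positions where consecutive boundaries differ, as [b-1, b].
import Mathlib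
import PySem

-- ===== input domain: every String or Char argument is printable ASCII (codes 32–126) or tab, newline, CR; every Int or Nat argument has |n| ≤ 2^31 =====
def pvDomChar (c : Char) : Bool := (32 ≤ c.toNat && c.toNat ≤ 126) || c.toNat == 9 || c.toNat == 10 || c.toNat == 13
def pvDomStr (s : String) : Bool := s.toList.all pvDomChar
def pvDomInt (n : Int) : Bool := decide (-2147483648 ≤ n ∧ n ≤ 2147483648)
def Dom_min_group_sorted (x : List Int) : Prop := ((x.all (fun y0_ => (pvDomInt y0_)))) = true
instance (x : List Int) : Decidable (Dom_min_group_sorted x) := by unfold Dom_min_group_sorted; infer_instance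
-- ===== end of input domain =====

-- B replaces A's nested whiles (shared index, intervals appended while skipping covered
-- points) by two staged passes: a boundary scan, then intervals rebuilt from the points
-- where consecutive boundaries differ (objective: alternative decomposition; same cost).

-- ===== PORT A =====
-- inner loop: 'while i < len(x) and x[i] <= r: i += 1'
-- (x[i] read via getD; the guard keeps i in range, so this is exact)
def pvSkipA (x : List Int) (r : Int) (i : Nat) : Nat :=
  if _h : i < x.length then
    if x.getD i 0 ≤ r then pvSkipA x r (i + 1) else i
  else i
termination_by x.length - i

-- needed by pvLoopA's termination: the inner while never moves i backwards …
theorem pvSkipA_ge (x : List Int) (r : Int) (i : Nat) : i ≤ pvSkipA x r i := by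
  by_cases hi : i < x.length
  · by_cases hle : x.getD i 0 ≤ r
    · rw [pvSkipA, dif_pos hi, if_pos hle]
      have := pvSkipA_ge x r (i + 1); omega
    · rw [pvSkipA, dif_pos hi, if_neg hle]
  · rw [pvSkipA, dif_neg hi]
termination_by x.length - i
decreasing_by omega

-- … and advances strictly past i when it runs
theorem pvSkipA_gt (x : List Int) (r : Int) (i : Nat) (hi : i < x.length)
    (hle : x.getD i 0 ≤ r) : i < pvSkipA x r i := by
  rw [pvSkipA, dif_pos hi, if_pos hle]
  have := pvSkipA_ge x r (i + 1); omega

-- outer loop: 'while i < len(x): l, r = [x[i], x[i]+1]; R.append([l, r]); <inner while>'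
-- (l and r written inline: l = x[i], r = x[i] + 1)
def pvLoopA (x : List Int) (i : Nat) (R : List (List Int)) : List (List Int) :=
  if h : i < x.length then
    pvLoopA x (pvSkipA x (x.getD i 0 + 1) i) (R ++ [[x.getD i 0, x.getD i 0 + 1]])
  else R
termination_by x.length - i
decreasing_by
  have := pvSkipA_gt x (x.getD i 0 + 1) i h (by omega)
  omega

def min_group_sorted (x : List Int) : List (List Int) := pvLoopA x 0 []

-- ===== PORT B =====
-- stage 1: 'for p in x: bounds.append(bounds[-1] if bounds and p <= bounds[-1] else p+1)'
def pvBoundsB (x : List Int) : List Int :=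
  x.foldl
    (fun bs p =>
      bs ++ [match bs.getLast? with
             | some b => if p ≤ b then b else p + 1
             | none => p + 1]) []

-- stage 2: '[[b-1, b] for b, prev in zip(bounds, [None] + bounds[:-1]) if b != prev]'
def min_group_sorted_alt (x : List Int) : List (List Int) :=
  let bounds := pvBoundsB x
  ((bounds.zip ((none : Option Int) :: bounds.dropLast.map some)).filter
      (fun bp => decide (some bp.1 ≠ bp.2))).map (fun bp => [bp.1 - 1, bp.1])

-- ===== PRECONDITION & SPEC =====
def Spec_min_group_sorted (x : List Int) (out : List (List Int)) : Prop := out = min_group_sorted_alt x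
instance (x : List Int) (out : List (List Int)) : Decidable (Spec_min_group_sorted x out) := by unfold Spec_min_group_sorted; infer_instance

-- ===== CLAIM (what is proved, stated in full; the proofs are below) =====
def Claim_equal_min_group_sorted : Prop := ∀ (x : List Int), Dom_min_group_sorted x → Spec_min_group_sorted x (min_group_sorted x)

-- ===== LEMMAS AND PROOFS =====

-- common reference: the greedy chain after an initial boundary r
def pvChain (r : Int) (l : List Int) : List (List Int) :=
  match l with
  | [] => []
  | p :: t => if p ≤ r then pvChain r t else [p, p + 1] :: pvChain (p + 1) t

-- A's outer loop, resumed after the inner skip with boundary r, yields pvChain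
theorem pvLoopA_eq_chain (x : List Int) (r : Int) (i : Nat) (R : List (List Int)) :
    pvLoopA x (pvSkipA x r i) R = R ++ pvChain r (x.drop i) := by
  by_cases hi : i < x.length
  · have hg : x[i] = x.getD i 0 := (List.getD_eq_getElem x 0 hi).symm
    rw [List.drop_eq_getElem_cons hi]
    by_cases hle : x.getD i 0 ≤ r
    · rw [pvSkipA, dif_pos hi, if_pos hle]
      have : pvChain r (x[i] :: x.drop (i + 1)) = pvChain r (x.drop (i + 1)) := by
        simp only [pvChain]; rw [if_pos (by rw [hg]; exact hle)]
      rw [this]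
      exact pvLoopA_eq_chain x r (i + 1) R
    · rw [pvSkipA, dif_pos hi, if_neg hle]
      rw [pvLoopA, dif_pos hi]
      have h1 : pvSkipA x (x.getD i 0 + 1) i = pvSkipA x (x.getD i 0 + 1) (i + 1) := by
        rw [pvSkipA, dif_pos hi, if_pos (by omega)]
      rw [h1, pvLoopA_eq_chain x (x.getD i 0 + 1) (i + 1) _]
      simp only [pvChain]
      rw [if_neg (by rw [hg]; exact hle), hg]
      simp
  · rw [pvSkipA, dif_neg hi, pvLoopA, dif_neg hi, List.drop_eq_nil_of_le (by omega)]
    simp [pvChain]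
termination_by x.length - i
decreasing_by all_goals omega

-- the boundary scan written as structural recursion with the running boundary explicit
def pvBF (r : Int) (l : List Int) : List Int :=
  match l with
  | [] => []
  | p :: t => (if p ≤ r then r else p + 1) :: pvBF (if p ≤ r then r else p + 1) t

theorem pvBoundsB_fold (l : List Int) (bs : List Int) (b : Int) :
    l.foldl
      (fun bs p =>
        bs ++ [match bs.getLast? with
               | some b => if p ≤ b then b else p + 1
               | none => p + 1]) (bs ++ [b]) = (bs ++ [b]) ++ pvBF b l := by
  induction l generalizing bs b with
  | nil => simp [pvBF]
  | cons p t ih =>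
      rw [List.foldl_cons]
      have hlast : (bs ++ [b]).getLast? = some b := by simp
      simp only [hlast]
      by_cases hle : p ≤ b
      · rw [if_pos hle]
        have := ih (bs ++ [b]) b
        rw [this]; simp [pvBF, if_pos hle]
      · rw [if_neg hle]
        have := ih (bs ++ [b]) (p + 1)
        rw [this]; simp [pvBF, if_neg hle]

theorem pvBoundsB_cons (p : Int) (t : List Int) :
    pvBoundsB (p :: t) = (p + 1) :: pvBF (p + 1) t := by
  unfold pvBoundsB
  rw [List.foldl_cons]
  have h0 : ([] : List Int) ++ [match ([] : List Int).getLast? with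
             | some b => if p ≤ b then b else p + 1
             | none => p + 1] = ([] : List Int) ++ [p + 1] := by simp
  rw [h0, pvBoundsB_fold t [] (p + 1)]
  simp

-- zipping against [None] + bounds[:-1] equals zipping against None :: map some bounds
-- (zip truncates to the shorter list, so the last element is never consulted)
theorem pvZipDropLast (l : List Int) (p : Option Int) :
    l.zip (p :: l.dropLast.map some) = l.zip (p :: l.map some) := by
  induction l generalizing p with
  | nil => rfl
  | cons a t ih =>
      cases t with
      | nil => rfl
      | cons b t' =>
          have := ih (p := some a)
          simp only [List.zip, List.zipWith] at *
          simpa using this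

-- stage 2 as a recursion with the previous boundary explicit
def pvF (prev : Option Int) (l : List Int) : List (List Int) :=
  ((l.zip (prev :: l.map some)).filter
      (fun bp => decide (some bp.1 ≠ bp.2))).map (fun bp => [bp.1 - 1, bp.1])

theorem pvF_cons (prev : Option Int) (b : Int) (t : List Int) :
    pvF prev (b :: t) =
      (if some b ≠ prev then [[b - 1, b]] else []) ++ pvF (some b) t := by
  simp only [pvF, List.zip, List.zipWith, List.filter, List.map]
  by_cases h : some b = prev
  · simp [h]
  · simp [h]

-- stage 2 on the boundary scan recovers the greedy chain
theorem pvF_chain (l : List Int) (r : Int) :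
    pvF (some r) (pvBF r l) = pvChain r l := by
  induction l generalizing r with
  | nil => rfl
  | cons p t ih =>
      simp only [pvBF]
      by_cases hle : p ≤ r
      · rw [if_pos hle, pvF_cons]
        rw [if_neg (by simp)]
        simp only [List.nil_append]
        rw [ih r]
        simp [pvChain, if_pos hle]
      · rw [if_neg hle, pvF_cons]
        rw [if_pos (by simp; omega)]
        rw [ih (p + 1)]
        have : p + 1 - 1 = p := by omega
        rw [this]
        simp [pvChain, if_neg hle]

-- ===== VERDICT (by name: the statement is the Claim_ definition above) =====
theorem min_group_sorted_spec : Claim_equal_min_group_sorted := by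
  intro x _
  unfold Spec_min_group_sorted
  cases x with
  | nil =>
      unfold min_group_sorted min_group_sorted_alt
      rw [pvLoopA]; rfl
  | cons p t =>
      -- A side reduces to [p, p+1] :: pvChain (p+1) t
      have hA : min_group_sorted (p :: t) = [[p, p + 1]] ++ pvChain (p + 1) t := by
        unfold min_group_sorted
        have h0 : 0 < (p :: t).length := by simp
        rw [pvLoopA, dif_pos h0]
        have h1 : pvSkipA (p :: t) ((p :: t).getD 0 0 + 1) 0
                = pvSkipA (p :: t) ((p :: t).getD 0 0 + 1) 1 := by
          rw [pvSkipA, dif_pos h0, if_pos (by simp)]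
        rw [h1, pvLoopA_eq_chain (p :: t) ((p :: t).getD 0 0 + 1) 1 _]
        simp
      -- B side reduces to the same
      have hB : min_group_sorted_alt (p :: t) = [[p, p + 1]] ++ pvChain (p + 1) t := by
        simp only [min_group_sorted_alt]
        rw [pvBoundsB_cons]
        rw [pvZipDropLast]
        have : ((((p + 1) :: pvBF (p + 1) t).zip
                  ((none : Option Int) :: ((p + 1) :: pvBF (p + 1) t).map some)).filter
                  (fun bp => decide (some bp.1 ≠ bp.2))).map (fun bp => [bp.1 - 1, bp.1])
             = pvF none ((p + 1) :: pvBF (p + 1) t) := rfl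
        rw [this, pvF_cons]
        rw [if_pos (by simp)]
        rw [pvF_chain]
        have : p + 1 - 1 = p := by omega
        rw [this]
      rw [hA, hB]
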